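-- pv_equiv track=rewrite | github.com/sinha108/tackle-test-generator-cli | tkltest/generate/augment.py | __group_tests_by_coverage_gain
-- ===== SOURCE A (Python) =====
-- def __group_tests_by_coverage_gain(tests_with_coverage_gain):
--     """Groups test cases by their coverage gain values.
--
--     Groups test cases by the coverage gain values, computed as sum of instruction and branch coverage gains.
--     Returns grouped test cases and reverse sorted list of coverage gain values.
--
--     Args:
--         tests_with_coverage_gain: Coverage gain information about test cases
--
--     Returns:
--         dict: test cases grouped by coverage gain values
--         list: reverse sorted list of coverage gain values
--     """
--     grouped_tests_with_cov_gain = {}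
--     cov_gain_values = []
--     for test_class in tests_with_coverage_gain.keys():
--         test_cov_gain = tests_with_coverage_gain[test_class]['instruction_cov_delta'] + \
--                         tests_with_coverage_gain[test_class]['branch_cov_delta']
--         if test_cov_gain not in grouped_tests_with_cov_gain.keys():
--             grouped_tests_with_cov_gain[test_cov_gain] = [test_class]
--             cov_gain_values.append(test_cov_gain)
--         else:
--             grouped_tests_with_cov_gain[test_cov_gain].append(test_class)
--     cov_gain_values.sort(reverse=True)
--     return grouped_tests_with_cov_gain, cov_gain_values
-- ===== SOURCE B (Python) =====
-- def __group_tests_by_coverage_gain(tests_with_coverage_gain):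
--     """Staged re-implementation: flatten to (gain, test) pairs, dedup the gains
--     in first-appearance order, then GATHER each group by filtering the pair list
--     per gain value (no incremental dict updates at all)."""
--     pairs = [(cov['instruction_cov_delta'] + cov['branch_cov_delta'], test_class)
--              for test_class, cov in tests_with_coverage_gain.items()]
--     order = list(dict.fromkeys(g for g, _ in pairs))
--     grouped_tests_with_cov_gain = {g: [c for gg, c in pairs if gg == g] for g in order}
--     return grouped_tests_with_cov_gain, sorted(order, reverse=True)
-- ===== Notes on version B (the rewrite author's own statement) =====
-- stated objective: alternative
-- what changed: A's single incremental pass (membership test, two dict-update branches, a parallel gain list) is replaced by three staged passes: flatten to (gain, test) pairs, dedup the gains in first-appearance order, then build each group by filtering the pair list per gain value; it trades the O(n) incremental grouping for an O(n*k) per-key gather.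
import Mathlib
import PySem

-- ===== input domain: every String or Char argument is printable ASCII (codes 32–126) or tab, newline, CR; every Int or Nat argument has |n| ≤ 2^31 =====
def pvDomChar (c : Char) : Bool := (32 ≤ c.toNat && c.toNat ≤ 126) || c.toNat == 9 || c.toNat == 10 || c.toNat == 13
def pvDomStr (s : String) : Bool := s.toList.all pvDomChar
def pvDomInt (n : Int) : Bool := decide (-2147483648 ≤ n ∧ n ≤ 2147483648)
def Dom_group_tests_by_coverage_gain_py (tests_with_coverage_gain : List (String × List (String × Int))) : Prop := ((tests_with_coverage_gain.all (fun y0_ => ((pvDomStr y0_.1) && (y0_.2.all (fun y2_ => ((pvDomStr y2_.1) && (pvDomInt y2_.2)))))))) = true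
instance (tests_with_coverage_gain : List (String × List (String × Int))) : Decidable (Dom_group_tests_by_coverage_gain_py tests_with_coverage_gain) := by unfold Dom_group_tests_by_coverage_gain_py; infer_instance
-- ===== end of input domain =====

-- B replaces A's incremental grouping pass (membership test, two update branches, parallel
-- gain list) by three staged passes: flatten to (gain, test) pairs, dedup the gains in
-- first-appearance order, gather each group by filtering the pair list per gain; same value.

-- ===== PORT A =====
-- A iterates over the keys of the dict and looks the value up again; the inner lookups
-- cov['instruction_cov_delta'] / cov['branch_cov_delta'] raise KeyError when the key is
-- missing — those inputs are excluded by Pre_ below, so the getD defaults are never reached.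
def group_tests_by_coverage_gain_py (tests_with_coverage_gain : List (String × List (String × Int))) : (List (Int × List String)) × List Int :=
  let d := PySem.Dict.ofList tests_with_coverage_gain
  let st := d.keys.foldl
    (fun (st : PySem.Dict Int (List String) × List Int) test_class =>
      let m := PySem.Dict.ofList (d.getD test_class [])
      let test_cov_gain := m.getD "instruction_cov_delta" 0 + m.getD "branch_cov_delta" 0
      if st.1.contains test_cov_gain = false then
        (st.1.insert test_cov_gain [test_class], st.2 ++ [test_cov_gain])
      else
        (st.1.modify test_cov_gain [] (fun l => l ++ [test_class]), st.2))
    (PySem.Dict.empty, [])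
  (st.1.items, PySem.List.sorted st.2 (fun x => x) true)

-- ===== PORT B =====
-- list(dict.fromkeys(gains)) is PySem.List.dedup; the dict comprehension over 'order'
-- (whose elements are distinct) is the association list built by map.
def group_tests_by_coverage_gain_py_alt (tests_with_coverage_gain : List (String × List (String × Int))) : (List (Int × List String)) × List Int :=
  let d := PySem.Dict.ofList tests_with_coverage_gain
  let pairs := d.items.map (fun p =>
    let m := PySem.Dict.ofList p.2
    (m.getD "instruction_cov_delta" 0 + m.getD "branch_cov_delta" 0, p.1))
  let order := PySem.List.dedup (pairs.map (fun q => q.1))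
  let grouped := order.map (fun g => (g, (pairs.filter (fun q => q.1 == g)).map (fun q => q.2)))
  (grouped, PySem.List.sorted order (fun x => x) true)

-- ===== PRECONDITION & SPEC =====
-- A raises KeyError when an inner coverage dict lacks 'instruction_cov_delta' or
-- 'branch_cov_delta'; Pre_ excludes exactly those inputs (A returns on every other one).
def Pre_group_tests_by_coverage_gain_py (tests_with_coverage_gain : List (String × List (String × Int))) : Prop :=
  ∀ p ∈ (PySem.Dict.ofList tests_with_coverage_gain).items,
    (PySem.Dict.ofList p.2).contains "instruction_cov_delta" = true ∧
    (PySem.Dict.ofList p.2).contains "branch_cov_delta" = true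
instance (tests_with_coverage_gain : List (String × List (String × Int))) : Decidable (Pre_group_tests_by_coverage_gain_py tests_with_coverage_gain) := by unfold Pre_group_tests_by_coverage_gain_py; infer_instance
def pvWitness_group_tests_by_coverage_gain_py : (List (String × List (String × Int))) :=
  [("t0", [("instruction_cov_delta", 2), ("branch_cov_delta", 1)]),
   ("t1", [("instruction_cov_delta", 3), ("branch_cov_delta", 0)])]

def Spec_group_tests_by_coverage_gain_py (tests_with_coverage_gain : List (String × List (String × Int))) (out : (List (Int × List String)) × List Int) : Prop := out = group_tests_by_coverage_gain_py_alt tests_with_coverage_gain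
instance (tests_with_coverage_gain : List (String × List (String × Int))) (out : (List (Int × List String)) × List Int) : Decidable (Spec_group_tests_by_coverage_gain_py tests_with_coverage_gain out) := by unfold Spec_group_tests_by_coverage_gain_py; infer_instance

-- ===== CLAIM (what is proved, stated in full; the proofs are below) =====
def Claim_equal_group_tests_by_coverage_gain_py : Prop := ∀ (tests_with_coverage_gain : List (String × List (String × Int))), Dom_group_tests_by_coverage_gain_py tests_with_coverage_gain → Pre_group_tests_by_coverage_gain_py tests_with_coverage_gain → Spec_group_tests_by_coverage_gain_py tests_with_coverage_gain (group_tests_by_coverage_gain_py tests_with_coverage_gain)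

-- ===== LEMMAS AND PROOFS =====

-- A's loop state is (grouped dict, gain-value list); the invariant is that the gain-value
-- list IS the key list of the grouped dict, and A's two branches both equal a single
-- modify step under it.
theorem pv_loop_eq (G : (String × List (String × Int)) → Int)
    (l : List (String × List (String × Int)))
    (g : PySem.Dict Int (List String)) (cov : List Int) (h : cov = g.keys) :
    l.foldl
      (fun (st : PySem.Dict Int (List String) × List Int) p =>
        if st.1.contains (G p) = false then
          (st.1.insert (G p) [p.1], st.2 ++ [G p])
        else
          (st.1.modify (G p) [] (fun l => l ++ [p.1]), st.2)) (g, cov)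
    = (l.foldl (fun g p => g.modify (G p) [] (fun l => l ++ [p.1])) g,
       (l.foldl (fun g p => g.modify (G p) [] (fun l => l ++ [p.1])) g).keys) := by
  induction l generalizing g cov with
  | nil => simp [h]
  | cons p t ih =>
    simp only [List.foldl_cons]
    by_cases hc : g.contains (G p) = false
    · rw [if_pos hc]
      have hmod : g.modify (G p) [] (fun l => l ++ [p.1]) = g.insert (G p) [p.1] := by
        simp [PySem.Dict.modify, PySem.Dict.getD_of_not_contains g [] hc]
      rw [hmod]
      exact ih _ _ (by
        rw [PySem.Dict.keys_insert_of_not_contains g [p.1] hc, h])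
    · rw [if_neg hc]
      exact ih _ _ (by
        rw [PySem.Dict.keys_modify,
          PySem.Dict.keys_insert_of_contains g _ (by simpa using hc), h])

-- The modify-fold over (gain, name) pairs, read off as an association list: its keys are
-- the deduped gains and each group is the filtered gather B performs.
theorem pv_modify_fold_char (pairs : List (Int × String)) :
    (pairs.foldl (fun (g : PySem.Dict Int (List String)) q => g.modify q.1 ([] : List String) (fun l => l ++ [q.2])) PySem.Dict.empty).keys = PySem.List.dedup (pairs.map (fun q => q.1)) ∧
    (pairs.foldl (fun (g : PySem.Dict Int (List String)) q => g.modify q.1 ([] : List String) (fun l => l ++ [q.2])) PySem.Dict.empty).items = (PySem.List.dedup (pairs.map (fun q => q.1))).map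
      (fun g => (g, (pairs.filter (fun q => q.1 == g)).map (fun q => q.2))) := by
  set F := pairs.foldl (fun (g : PySem.Dict Int (List String)) q => g.modify q.1 ([] : List String) (fun l => l ++ [q.2])) PySem.Dict.empty with hF
  have hkeys : F.keys = PySem.List.dedup (pairs.map (fun q => q.1)) := by
    have := PySem.Dict.keys_foldl_modify_key pairs (fun q => q.1) ([] : List String) (fun _ q l => l ++ [q.2]) PySem.Dict.empty
    simpa [PySem.Set.update, PySem.Set.ofList_eq_foldl] using this
  refine ⟨hkeys, ?_⟩
  have hnd : F.keys.Nodup := by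
    rw [hkeys]; exact PySem.List.nodup_dedup _
  rw [PySem.Dict.items_eq_map_keys F hnd ([] : List String), hkeys]
  apply List.map_congr_left
  intro g hg
  have : F.getD g [] = (pairs.filter (fun q => q.1 == g)).map (fun q => q.2) := by
    have := PySem.Dict.getD_foldl_modify_append pairs PySem.Dict.empty g
    simpa using this
  simp [this]

-- ===== VERDICT (by name: the statement is the Claim_ definition above) =====
theorem group_tests_by_coverage_gain_py_spec : Claim_equal_group_tests_by_coverage_gain_py := by
  intro tests _ _
  unfold Spec_group_tests_by_coverage_gain_py
  unfold group_tests_by_coverage_gain_py group_tests_by_coverage_gain_py_alt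
  simp only []
  set d := PySem.Dict.ofList tests with hd
  -- A folds over d.keys, re-looking each value up; rewrite it as a fold over d.items.
  have hkeys : d.keys = d.items.map (fun p => p.1) := rfl
  rw [hkeys, List.foldl_map]
  have hcong :
      d.items.foldl
        (fun (st : PySem.Dict Int (List String) × List Int) p =>
          let m := PySem.Dict.ofList (d.getD p.1 [])
          let gn := m.getD "instruction_cov_delta" 0 + m.getD "branch_cov_delta" 0
          if st.1.contains gn = false then (st.1.insert gn [p.1], st.2 ++ [gn])
          else (st.1.modify gn [] (fun l => l ++ [p.1]), st.2)) (PySem.Dict.empty, [])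
      = d.items.foldl
        (fun (st : PySem.Dict Int (List String) × List Int) p =>
          let m := PySem.Dict.ofList p.2
          let gn := m.getD "instruction_cov_delta" 0 + m.getD "branch_cov_delta" 0
          if st.1.contains gn = false then (st.1.insert gn [p.1], st.2 ++ [gn])
          else (st.1.modify gn [] (fun l => l ++ [p.1]), st.2)) (PySem.Dict.empty, []) := by
    apply PySem.List.foldl_congr_mem
    intro acc p hp
    have : d.getD p.1 [] = p.2 := by
      obtain ⟨k, v⟩ := p
      exact PySem.Dict.getD_of_mem_items d hp (PySem.Dict.nodup_keys_ofList tests) []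
    simp [this]
  rw [hcong]
  rw [pv_loop_eq (fun p => (PySem.Dict.ofList p.2).getD "instruction_cov_delta" 0
        + (PySem.Dict.ofList p.2).getD "branch_cov_delta" 0) d.items PySem.Dict.empty [] rfl]
  -- Now rewrite A's modify-fold over items as a fold over B's (gain, name) pair list.
  have hmap :
      d.items.foldl
        (fun (g : PySem.Dict Int (List String)) p =>
          g.modify ((PySem.Dict.ofList p.2).getD "instruction_cov_delta" 0
            + (PySem.Dict.ofList p.2).getD "branch_cov_delta" 0) [] (fun l => l ++ [p.1]))
        PySem.Dict.empty
      = (d.items.map (fun p =>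
          ((PySem.Dict.ofList p.2).getD "instruction_cov_delta" 0
            + (PySem.Dict.ofList p.2).getD "branch_cov_delta" 0, p.1))).foldl
        (fun (g : PySem.Dict Int (List String)) q => g.modify q.1 [] (fun l => l ++ [q.2]))
        PySem.Dict.empty := by
    rw [List.foldl_map]
  rw [hmap]
  obtain ⟨h1, h2⟩ := pv_modify_fold_char (d.items.map (fun p =>
      ((PySem.Dict.ofList p.2).getD "instruction_cov_delta" 0
        + (PySem.Dict.ofList p.2).getD "branch_cov_delta" 0, p.1)))
  rw [h1, h2]
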